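-- pv_equiv track=rewrite | github.com/cepexaaa/aboutme | programming/Discrete Math/dmlab.py | dfs
-- ===== SOURCE A (Python) =====
-- def dfs(u, v, transitions1, transitions2, visited, associations):
--     visited[u] = True
--
--     if u in transitions1 and v in transitions2:
--         if transitions1[u] != transitions2[v]:
--             return False
--     else:
--         return False
--
--     associations[u] = v
--     result = True
--     for c, q in transitions1[u].items():
--         t1 = q
--         t2 = transitions2[v][c]
--         if t1 is None or t2 is None:
--             return False
--         if visited[t1]:
--             result = result and t2 == associations[t1]
--         else:
--             result = result and dfs(t1, t2, transitions1, transitions2, visited, associations)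
--
--     return result
-- ===== SOURCE B (Python) =====
-- def dfs(u, v, transitions1, transitions2, visited, associations):
--     # Iterative DFS with an explicit stack of (target-state, pending edges) frames;
--     # performs the same visited/associations mutations as the recursive original,
--     # and returns False at the first failed check (the recursion's AND short-circuits
--     # globally, so the first failure already determines the result).
--     def visit(x, y):
--         visited[x] = True
--         if x in transitions1 and y in transitions2 and transitions1[x] == transitions2[y]:
--             associations[x] = y
--             return list(transitions1[x].items())
--         return None
--
--     pending = visit(u, v)
--     if pending is None:
--         return False
--     stack = [(v, pending)]
--     while stack:
--         w, items = stack[-1]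
--         if not items:
--             stack.pop()
--             continue
--         c, t1 = items.pop(0)
--         if t1 is None:
--             return False
--         t2 = transitions2[w].get(c)
--         if t2 is None:
--             return False
--         if visited.get(t1, False):
--             if associations.get(t1) != t2:
--                 return False
--         else:
--             child = visit(t1, t2)
--             if child is None:
--                 return False
--             stack.append((t2, child))
--     return True
-- ===== Notes on version B (the rewrite author's own statement) =====
-- stated objective: alternative
-- what changed: The recursive DFS with a per-frame AND fold is replaced by an iterative DFS over an explicit stack of (state, pending-edges) frames with a single global early return at the first failed check (the recursion's AND short-circuits globally, so the first failure already determines the result).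
-- outside the precondition, e.g. on dfs(0, 1, {0: {'a': None}, 9: {'b': 5}}, {1: {'a': None}}, {}, {}): A returns False, B returns False
import Mathlib
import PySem

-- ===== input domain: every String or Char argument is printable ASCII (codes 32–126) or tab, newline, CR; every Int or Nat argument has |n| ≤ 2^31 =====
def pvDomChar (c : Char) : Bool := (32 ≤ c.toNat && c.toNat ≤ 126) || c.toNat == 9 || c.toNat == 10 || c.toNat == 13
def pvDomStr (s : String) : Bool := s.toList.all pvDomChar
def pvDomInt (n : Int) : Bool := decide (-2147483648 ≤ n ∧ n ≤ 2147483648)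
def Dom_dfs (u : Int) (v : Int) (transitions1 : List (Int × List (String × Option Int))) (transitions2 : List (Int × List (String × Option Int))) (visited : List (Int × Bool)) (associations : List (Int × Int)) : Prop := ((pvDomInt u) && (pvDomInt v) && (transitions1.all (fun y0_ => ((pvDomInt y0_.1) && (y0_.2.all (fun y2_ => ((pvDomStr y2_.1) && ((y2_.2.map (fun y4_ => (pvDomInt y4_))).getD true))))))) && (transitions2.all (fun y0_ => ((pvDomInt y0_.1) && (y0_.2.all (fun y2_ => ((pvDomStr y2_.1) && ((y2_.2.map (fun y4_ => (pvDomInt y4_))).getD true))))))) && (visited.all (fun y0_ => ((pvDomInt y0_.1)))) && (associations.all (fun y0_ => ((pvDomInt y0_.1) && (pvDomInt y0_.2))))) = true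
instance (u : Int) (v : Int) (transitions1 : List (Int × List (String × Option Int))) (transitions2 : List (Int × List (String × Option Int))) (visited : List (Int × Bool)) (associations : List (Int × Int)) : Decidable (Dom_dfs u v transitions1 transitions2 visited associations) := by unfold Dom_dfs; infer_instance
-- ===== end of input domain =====

-- B replaces the recursive DFS by an iterative explicit-stack DFS that returns at the
-- first failed check (an equally costly alternative decomposition, not claimed faster);
-- both Pythons mutate visited/associations identically, the theorems are about the return value.


-- ===== PORT A =====
-- used by the ports' termination proofs (cited in decreasing_by)
theorem pvLexSub {x f a b : Nat} (h : a < b) :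
    Prod.Lex Nat.lt Nat.lt (f - x, a) (f, b) := by
  rcases Nat.lt_or_ge (f - x) f with h1 | h1
  · exact Prod.Lex.left _ _ h1
  · have he : f - x = f := Nat.le_antisymm (Nat.sub_le _ _) h1
    rw [he]; exact Prod.Lex.right _ h

-- Python's `==` on two dicts (order-insensitive key→value comparison); used by both
-- Pythons for `transitions1[u] == transitions2[v]` (values are unique-keyed dicts).
def pyDictEq (d1 d2 : List (String × Option Int)) : Bool :=
  d1.length == d2.length && d1.all (fun p => (PySem.Dict.mk d2).get? p.1 == some p.2)

-- dfsA/loopA transliterate A: the recursive call, and the for-loop over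
-- transitions1[u].items() carrying (result, visited, associations).  The state
-- (visited, associations) is threaded because Python mutates the dicts in place.
-- fuel is a totality guard (the Python recursion is finite: each nested call flips one
-- visited entry from False to True); the wrapper passes enough fuel for every input, and
-- the last component of the result is the amount of fuel consumed (number of nested calls).
-- KeyError points of the Python (visited[t1] / associations[t1] / transitions2[v][c] with
-- a missing key) are excluded by Pre_dfs; there the port returns the `false` default.
mutual
def dfsA (fuel : Nat) (u v : Int)
    (t1s t2s : PySem.Dict Int (List (String × Option Int)))
    (vis : PySem.Dict Int Bool) (assoc : PySem.Dict Int Int) :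
    Bool × PySem.Dict Int Bool × PySem.Dict Int Int × Nat :=
  match fuel with
  | 0 => (false, vis, assoc, 0)                       -- fuel guard, unreachable from the wrapper
  | f + 1 =>
    let vis := vis.insert u true                      -- visited[u] = True
    match t1s.get? u, t2s.get? v with                 -- u in transitions1 and v in transitions2
    | some du, some dv =>
      if pyDictEq du dv then                          -- transitions1[u] != transitions2[v] → False
        let assoc := assoc.insert u v                 -- associations[u] = v
        let r := loopA f du v t1s t2s vis assoc true  -- for c, q in transitions1[u].items()
        (r.1, r.2.1, r.2.2.1, r.2.2.2 + 1)
      else (false, vis, assoc, 1)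
    | _, _ => (false, vis, assoc, 1)
termination_by (fuel, 0)
decreasing_by all_goals (simp_wf; apply Prod.Lex.left; omega)

def loopA (fuel : Nat) (items : List (String × Option Int)) (v : Int)
    (t1s t2s : PySem.Dict Int (List (String × Option Int)))
    (vis : PySem.Dict Int Bool) (assoc : PySem.Dict Int Int) (result : Bool) :
    Bool × PySem.Dict Int Bool × PySem.Dict Int Int × Nat :=
  match items with
  | [] => (result, vis, assoc, 0)
  | (c, q) :: rest =>
    match t2s.get? v with
    | none => (false, vis, assoc, 0)                  -- KeyError guard (v was checked: unreachable)
    | some dv =>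
      match (PySem.Dict.mk dv).get? c, q with         -- t2 = transitions2[v][c]; t1 = q
      | none, _ => (false, vis, assoc, 0)             -- KeyError guard, outside Pre_dfs
      | some none, _ => (false, vis, assoc, 0)        -- t2 is None → return False
      | some (some _), none => (false, vis, assoc, 0) -- t1 is None → return False
      | some (some t2), some t1 =>
        if vis.getD t1 false then                     -- visited[t1]; KeyError (t1 absent) outside Pre_dfs
          -- result = result and t2 == associations[t1] (short-circuit: not read when result is False)
          let result := if result then
              (match assoc.get? t1 with
               | some a => decide (t2 = a)
               | none => false)                       -- KeyError guard, outside Pre_dfs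
            else false
          loopA fuel rest v t1s t2s vis assoc result
        else
          -- result = result and dfs(t1, t2, …) (dfs not called when result is False)
          if result then
            let r := dfsA fuel t1 t2 t1s t2s vis assoc
            let r2 := loopA (fuel - r.2.2.2) rest v t1s t2s r.2.1 r.2.2.1 r.1
            (r2.1, r2.2.1, r2.2.2.1, r.2.2.2 + r2.2.2.2)
          else loopA fuel rest v t1s t2s vis assoc false
termination_by (fuel, items.length + 1)
decreasing_by all_goals (simp_wf; first
  | (apply Prod.Lex.left; omega)
  | (apply Prod.Lex.right; omega)
  | (exact pvLexSub (by omega)))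
end

def dfs (u : Int) (v : Int) (transitions1 : List (Int × List (String × Option Int))) (transitions2 : List (Int × List (String × Option Int))) (visited : List (Int × Bool)) (associations : List (Int × Int)) : Bool :=
  (dfsA (visited.length + transitions1.length + 1) u v
    (PySem.Dict.mk transitions1) (PySem.Dict.mk transitions2)
    (PySem.Dict.mk visited) (PySem.Dict.mk associations)).1

-- ===== PORT B =====
-- Source B's local helper visit(x, y): mark x visited, check membership and dict equality,
-- record the association and hand back the pending edge list (None on failure).
def visitB (t1s t2s : PySem.Dict Int (List (String × Option Int)))
    (vis : PySem.Dict Int Bool) (assoc : PySem.Dict Int Int) (x y : Int) :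
    PySem.Dict Int Bool × PySem.Dict Int Int × Option (List (String × Option Int)) :=
  let vis := vis.insert x true
  match t1s.get? x, t2s.get? y with
  | some dx, some dy =>
    if pyDictEq dx dy then (vis, assoc.insert x y, some dx) else (vis, assoc, none)
  | _, _ => (vis, assoc, none)

-- Source B's while-loop over the explicit stack of (state, pending edges) frames; fuel is a
-- totality guard consumed once per push (never exhausted from the wrapper's fuel).
def runB (fuel : Nat) (stack : List (Int × List (String × Option Int)))
    (t1s t2s : PySem.Dict Int (List (String × Option Int)))
    (vis : PySem.Dict Int Bool) (assoc : PySem.Dict Int Int) : Bool :=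
  match stack with
  | [] => true
  | (_, []) :: stk => runB fuel stk t1s t2s vis assoc          -- if not items: stack.pop()
  | (w, (c, q) :: tail) :: stk =>
    match q with
    | none => false                                            -- t1 is None → return False
    | some t1 =>
      match t2s.get? w with
      | none => false                                          -- unreachable: frames hold checked states
      | some dw =>
        match (PySem.Dict.mk dw).get? c with                   -- t2 = transitions2[w].get(c)
        | none => false                                        -- missing key → .get gives None
        | some none => false                                   -- stored None → return False
        | some (some t2) =>
          if vis.getD t1 false then                            -- visited.get(t1, False)
            if assoc.get? t1 == some t2 then                   -- associations.get(t1) != t2 → False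
              runB fuel ((w, tail) :: stk) t1s t2s vis assoc
            else false
          else
            match fuel with
            | 0 => false                                       -- fuel guard, unreachable from the wrapper
            | f + 1 =>
              match visitB t1s t2s vis assoc t1 t2 with
              | (_, _, none) => false                          -- child is None → return False
              | (vis', assoc', some child) =>
                  runB f ((t2, child) :: (w, tail) :: stk) t1s t2s vis' assoc'
termination_by (fuel, (stack.map (fun fr => fr.2.length + 1)).sum)
decreasing_by all_goals (simp_wf; first
  | (apply Prod.Lex.left; omega)
  | (apply Prod.Lex.right; omega))

def dfs_alt (u : Int) (v : Int) (transitions1 : List (Int × List (String × Option Int))) (transitions2 : List (Int × List (String × Option Int))) (visited : List (Int × Bool)) (associations : List (Int × Int)) : Bool :=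
  match visitB (PySem.Dict.mk transitions1) (PySem.Dict.mk transitions2)
      (PySem.Dict.mk visited) (PySem.Dict.mk associations) u v with
  | (_, _, none) => false
  | (vis1, as1, some pending) =>
      runB (visited.length + transitions1.length) [(v, pending)]
        (PySem.Dict.mk transitions1) (PySem.Dict.mk transitions2) vis1 as1

-- ===== PRECONDITION & SPEC =====
-- Pre_dfs excludes exactly the inputs on which the Python A raises KeyError (reading
-- visited[t1] for a transition target missing from visited, or associations[t1] for a
-- state pre-marked visited without an association); the reads can only be reached when
-- the top-level membership/equality check passes, so the conditions are required only
-- then.  They are conservative over ALL rows of transitions1/visited (a closed form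
-- cannot follow reachability), so they also exclude some inputs on which A returns
-- False before reaching the offending row — see the cite in the claim.
-- the top-level membership/equality test of A, as a Boolean on the inputs
def pvEntryOk (u v : Int) (transitions1 transitions2 : List (Int × List (String × Option Int))) : Bool :=
  match (PySem.Dict.mk transitions1).get? u, (PySem.Dict.mk transitions2).get? v with
  | some du, some dv => pyDictEq du dv
  | _, _ => false

def Pre_dfs (u : Int) (v : Int) (transitions1 : List (Int × List (String × Option Int))) (transitions2 : List (Int × List (String × Option Int))) (visited : List (Int × Bool)) (associations : List (Int × Int)) : Prop :=
  pvEntryOk u v transitions1 transitions2 = true →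
  ((∀ p ∈ transitions1, ∀ e ∈ p.2, ∀ t : Int, e.2 = some t →
      (PySem.Dict.mk visited).contains t = true) ∧
   (∀ p ∈ visited, p.2 = true → (PySem.Dict.mk associations).contains p.1 = true))
instance (u : Int) (v : Int) (transitions1 : List (Int × List (String × Option Int))) (transitions2 : List (Int × List (String × Option Int))) (visited : List (Int × Bool)) (associations : List (Int × Int)) : Decidable (Pre_dfs u v transitions1 transitions2 visited associations) := by unfold Pre_dfs; infer_instance

def pvWitness_dfs : Int × Int × (List (Int × List (String × Option Int))) × (List (Int × List (String × Option Int))) × (List (Int × Bool)) × (List (Int × Int)) :=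
  (0, 0, [(0, [("a", some 0)])], [(0, [("a", some 0)])], [(0, false)], [])

def Spec_dfs (u : Int) (v : Int) (transitions1 : List (Int × List (String × Option Int))) (transitions2 : List (Int × List (String × Option Int))) (visited : List (Int × Bool)) (associations : List (Int × Int)) (out : Bool) : Prop := out = dfs_alt u v transitions1 transitions2 visited associations
instance (u : Int) (v : Int) (transitions1 : List (Int × List (String × Option Int))) (transitions2 : List (Int × List (String × Option Int))) (visited : List (Int × Bool)) (associations : List (Int × Int)) (out : Bool) : Decidable (Spec_dfs u v transitions1 transitions2 visited associations out) := by unfold Spec_dfs; infer_instance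

-- ===== CLAIM (what is proved, stated in full; the proofs are below) =====
def Claim_equal_dfs : Prop := ∀ (u : Int) (v : Int) (transitions1 : List (Int × List (String × Option Int))) (transitions2 : List (Int × List (String × Option Int))) (visited : List (Int × Bool)) (associations : List (Int × Int)), Dom_dfs u v transitions1 transitions2 visited associations → Pre_dfs u v transitions1 transitions2 visited associations → Spec_dfs u v transitions1 transitions2 visited associations (dfs u v transitions1 transitions2 visited associations)

-- ===== LEMMAS AND PROOFS =====

-- Once result is False the remaining loop iterations of A change nothing and consume no fuel.
theorem loopA_false (fuel : Nat) (items : List (String × Option Int)) (v : Int)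
    (t1s t2s : PySem.Dict Int (List (String × Option Int)))
    (vis : PySem.Dict Int Bool) (assoc : PySem.Dict Int Int) :
    loopA fuel items v t1s t2s vis assoc false = (false, vis, assoc, 0) := by
  induction items with
  | nil => rw [loopA]
  | cons hd rest ih =>
    obtain ⟨c, q⟩ := hd
    rw [loopA]
    split
    · rfl
    · split
      · rfl
      · rfl
      · rfl
      · split
        · simpa using ih
        · simpa using ih

-- The stack machine run on a frame equals A's loop over that frame's items followed by
-- the run on the remaining stack (fuel synchronised: both sides consume one unit per
-- node entered, so after the frame B's remaining fuel is A's fuel minus A's consumption).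
theorem runB_eq_loopA : ∀ (fuel : Nat) (items : List (String × Option Int)) (v : Int)
    (stk : List (Int × List (String × Option Int)))
    (t1s t2s : PySem.Dict Int (List (String × Option Int)))
    (vis : PySem.Dict Int Bool) (assoc : PySem.Dict Int Int),
    runB fuel ((v, items) :: stk) t1s t2s vis assoc =
      (if (loopA fuel items v t1s t2s vis assoc true).1 then
        runB (fuel - (loopA fuel items v t1s t2s vis assoc true).2.2.2) stk t1s t2s
          (loopA fuel items v t1s t2s vis assoc true).2.1
          (loopA fuel items v t1s t2s vis assoc true).2.2.1
      else false) := by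
  intro fuel
  induction fuel using Nat.strong_induction_on with
  | _ fuel IHf =>
  intro items v stk t1s t2s vis assoc
  induction items generalizing vis assoc with
  | nil => simp [runB, loopA]
  | cons hd rest ih =>
    obtain ⟨c, q⟩ := hd
    rw [runB.eq_def, loopA]
    cases q with
    | none =>
      cases hv : t2s.get? v with
      | none => simp
      | some dv =>
        cases hc : (PySem.Dict.mk dv).get? c with
        | none => simp [hc]
        | some o =>
          cases o with
          | none => simp [hc]
          | some t2 => simp [hc]
    | some t1 =>
      cases hv : t2s.get? v with
      | none => simp [hv]
      | some dv =>
        cases hc : (PySem.Dict.mk dv).get? c with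
        | none => simp [hv, hc]
        | some o =>
          cases o with
          | none => simp [hv, hc]
          | some t2 =>
            simp only [hv, hc]
            by_cases hvis : vis.getD t1 false = true
            · simp only [hvis, if_true]
              cases ha : assoc.get? t1 with
              | none => simp [loopA_false]
              | some a =>
                by_cases he : t2 = a
                · subst he
                  simpa using ih vis assoc
                · have hd : decide (t2 = a) = false := by simp [he]
                  simp [hd, loopA_false]
                  exact fun h => absurd h.symm he
            · simp only [hvis]
              cases fuel with
              | zero => rw [dfsA]; simp [loopA_false]
              | succ f =>
                rw [dfsA, visitB]
                cases hx : t1s.get? t1 with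
                | none => simp [loopA_false]
                | some dx =>
                  cases hy : t2s.get? t2 with
                  | none => simp [loopA_false]
                  | some dy =>
                    by_cases heq : pyDictEq dx dy = true
                    · simp only [heq, if_true]
                      rw [IHf f (Nat.lt_succ_self f) dx t2 ((v, rest) :: stk) t1s t2s
                        (vis.insert t1 true) (assoc.insert t1 t2)]
                      cases hrc : (loopA f dx t2 t1s t2s (vis.insert t1 true) (assoc.insert t1 t2) true).1 with
                      | false => simp [loopA_false]
                      | true =>
                        simp only [if_true]
                        rw [IHf (f - (loopA f dx t2 t1s t2s (vis.insert t1 true) (assoc.insert t1 t2) true).2.2.2)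
                          (by omega) rest v stk t1s t2s
                          (loopA f dx t2 t1s t2s (vis.insert t1 true) (assoc.insert t1 t2) true).2.1 (loopA f dx t2 t1s t2s (vis.insert t1 true) (assoc.insert t1 t2) true).2.2.1]
                        have h1 : f + 1 - ((loopA f dx t2 t1s t2s (vis.insert t1 true) (assoc.insert t1 t2) true).2.2.2 + 1) = f - (loopA f dx t2 t1s t2s (vis.insert t1 true) (assoc.insert t1 t2) true).2.2.2 := by omega
                        rw [h1]
                        have h2 : f + 1 - ((loopA f dx t2 t1s t2s (vis.insert t1 true) (assoc.insert t1 t2) true).2.2.2 + 1 + (loopA (f - (loopA f dx t2 t1s t2s (vis.insert t1 true) (assoc.insert t1 t2) true).2.2.2) rest v t1s t2s (loopA f dx t2 t1s t2s (vis.insert t1 true) (assoc.insert t1 t2) true).2.1 (loopA f dx t2 t1s t2s (vis.insert t1 true) (assoc.insert t1 t2) true).2.2.1 true).2.2.2)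
                            = f - (loopA f dx t2 t1s t2s (vis.insert t1 true) (assoc.insert t1 t2) true).2.2.2 - (loopA (f - (loopA f dx t2 t1s t2s (vis.insert t1 true) (assoc.insert t1 t2) true).2.2.2) rest v t1s t2s (loopA f dx t2 t1s t2s (vis.insert t1 true) (assoc.insert t1 t2) true).2.1 (loopA f dx t2 t1s t2s (vis.insert t1 true) (assoc.insert t1 t2) true).2.2.1 true).2.2.2 := by omega
                        simp [h2]
                    · simp [heq, loopA_false]

theorem dfs_eq_alt (u : Int) (v : Int) (transitions1 : List (Int × List (String × Option Int))) (transitions2 : List (Int × List (String × Option Int))) (visited : List (Int × Bool)) (associations : List (Int × Int)) :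
    dfs u v transitions1 transitions2 visited associations
      = dfs_alt u v transitions1 transitions2 visited associations := by
  unfold dfs dfs_alt
  rw [dfsA, visitB]
  cases hx : (PySem.Dict.mk transitions1).get? u with
  | none => rfl
  | some du =>
    cases hy : (PySem.Dict.mk transitions2).get? v with
    | none => rfl
    | some dv =>
      by_cases heq : pyDictEq du dv = true
      · simp only [heq, if_true]
        rw [runB_eq_loopA]
        split
        · next h => simp [h, runB]
        · next h => simp at h; simp [h]
      · simp [heq]

-- ===== VERDICT (by name: the statement is the Claim_ definition above) =====
theorem dfs_spec : Claim_equal_dfs := by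
  intro u v t1 t2 vis assoc _ _
  exact dfs_eq_alt u v t1 t2 vis assoc
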